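-- pv_equiv track=rewrite | github.com/panagiota02/panagiota | Panayiota_final/1.py | diakonia_kato
-- ===== SOURCE A (Python) =====
-- def diakonia_kato (tetrag, diast): #diagonia -> \
--     cnt=0
--     z=diast-3
--     for sira in range(1,z):
--         x=0
--         for i in range(sira,z):
--             vrika_tetrada=True
--             w=x
--             for d in range(i,i+4):
--                 if (tetrag[d][w]//10 != 0):
--                    vrika_tetrada=False
--                 w+=1
--             if vrika_tetrada == True:
--                         cnt+=1
--             x+=1
--     return cnt
-- ===== SOURCE B (Python) =====
-- def diakonia_kato(tetrag, diast):
--     # Per diagonal: first materialise the list of "single-digit cell" booleans,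
--     # then count 4-windows by run-length arithmetic: each maximal run of length
--     # L contributes max(0, L - 3) windows (no per-window rescan).
--     cnt = 0
--     z = diast - 3
--     for sira in range(1, z):
--         good = [tetrag[r][r - sira] // 10 == 0 for r in range(sira, z + 3)]
--         L = 0
--         for b in good:
--             if b:
--                 L += 1
--             else:
--                 cnt += max(0, L - 3)
--                 L = 0
--         cnt += max(0, L - 3)
--     return cnt
-- ===== Notes on version B (the rewrite author's own statement) =====
-- stated objective: alternative
-- what changed: A rescans the 4 cells of every diagonal window with an innermost loop; B per diagonal first builds the boolean list of single-digit cells and then counts windows by run-length arithmetic, adding max(0, runlength-3) at the end of each maximal run of good cells, so the inner 4-cell rescan disappears (one read per cell; not measurably faster at the tested sizes).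
import Mathlib
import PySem

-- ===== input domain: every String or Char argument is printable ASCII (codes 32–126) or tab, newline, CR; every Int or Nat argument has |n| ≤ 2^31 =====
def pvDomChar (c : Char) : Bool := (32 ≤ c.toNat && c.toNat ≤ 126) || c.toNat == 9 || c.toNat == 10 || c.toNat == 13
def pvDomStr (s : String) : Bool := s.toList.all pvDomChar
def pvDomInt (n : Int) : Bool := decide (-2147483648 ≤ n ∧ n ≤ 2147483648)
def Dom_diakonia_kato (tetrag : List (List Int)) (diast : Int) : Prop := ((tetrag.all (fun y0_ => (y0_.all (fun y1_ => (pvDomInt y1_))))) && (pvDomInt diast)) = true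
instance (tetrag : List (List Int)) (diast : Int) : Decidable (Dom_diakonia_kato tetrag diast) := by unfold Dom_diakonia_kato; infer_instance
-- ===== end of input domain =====

-- B replaces A's per-window rescan of 4 diagonal cells by building each diagonal's boolean
-- list once and counting windows by run-length arithmetic (alternative algorithm; same cells
-- are read, so within Pre_ the behaviour is identical).

-- ===== PORT A =====
-- literal transliteration of A: triple nested loop; innermost rescans the 4 cells of each window
def diakonia_kato (tetrag : List (List Int)) (diast : Int) : Int :=
  (PySem.List.pyRange 1 (diast - 3) 1).foldl (fun cnt sira =>
    ((PySem.List.pyRange sira (diast - 3) 1).foldl (fun (st : Int × Int) i =>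
        let inner := (PySem.List.pyRange i (i+4) 1).foldl
          (fun (st2 : Bool × Int) d =>
            (if PySem.Int.floordiv (PySem.List.pyGetD (PySem.List.pyGetD tetrag d []) st2.2 0) 10 ≠ 0
               then false else st2.1,
             st2.2 + 1))
          (true, st.2)
        (if inner.1 then st.1 + 1 else st.1, st.2 + 1))
      (cnt, 0)).1) 0

-- ===== PORT B =====
-- literal transliteration of B: per diagonal, build the boolean list `good`, then one
-- run-length pass flushing max(0, L-3) at each run end (and once at the end)
def diakonia_kato_alt (tetrag : List (List Int)) (diast : Int) : Int :=
  (PySem.List.pyRange 1 (diast - 3) 1).foldl (fun cnt sira =>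
    let good := (PySem.List.pyRange sira ((diast - 3) + 3) 1).map
      (fun r => decide (PySem.Int.floordiv
        (PySem.List.pyGetD (PySem.List.pyGetD tetrag r []) (r - sira) 0) 10 = 0))
    let st := good.foldl
      (fun (st : Int × Int) b => if b then (st.1, st.2 + 1) else (st.1 + max 0 (st.2 - 3), 0))
      (cnt, 0)
    st.1 + max 0 (st.2 - 3)) 0

-- ===== PRECONDITION & SPEC =====
-- Pre_ = exactly the inputs where Python A returns (no IndexError): either the loops are empty
-- (diast ≤ 4), or all accessed rows 1..diast-1 exist and row d has at least d entries.
def Pre_diakonia_kato (tetrag : List (List Int)) (diast : Int) : Prop :=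
  diast ≤ 4 ∨ (diast ≤ (tetrag.length : Int) ∧
    ∀ d ∈ List.range diast.toNat, 1 ≤ d → d ≤ (tetrag.getD d []).length)
instance (tetrag : List (List Int)) (diast : Int) : Decidable (Pre_diakonia_kato tetrag diast) := by
  unfold Pre_diakonia_kato; infer_instance
def pvWitness_diakonia_kato : List (List Int) × Int :=
  ([[0], [1, 2], [3, 4, 5], [6, 7, 8, 9], [1, 2, 3, 4, 0]], 5)
def Spec_diakonia_kato (tetrag : List (List Int)) (diast : Int) (out : Int) : Prop := out = diakonia_kato_alt tetrag diast
instance (tetrag : List (List Int)) (diast : Int) (out : Int) : Decidable (Spec_diakonia_kato tetrag diast out) := by unfold Spec_diakonia_kato; infer_instance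

-- ===== CLAIM (what is proved, stated in full; the proofs are below) =====
def Claim_equal_diakonia_kato : Prop := ∀ (tetrag : List (List Int)) (diast : Int), Dom_diakonia_kato tetrag diast → Pre_diakonia_kato tetrag diast → Spec_diakonia_kato tetrag diast (diakonia_kato tetrag diast)

-- ===== LEMMAS AND PROOFS =====

-- the single-digit test of the diagonal cell (row r, column r - sira)
def pvG (tetrag : List (List Int)) (sira r : Int) : Bool :=
  decide (PySem.Int.floordiv (PySem.List.pyGetD (PySem.List.pyGetD tetrag r []) (r - sira) 0) 10 = 0)

-- a length-4 window of good cells starting at row a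
def pvW (g : Int → Bool) (a : Int) : Bool := g a && g (a+1) && g (a+2) && g (a+3)

-- A's middle loop as a recursion: n window starts from row a
def pvAC (g : Int → Bool) (a : Int) : Nat → Int
  | 0 => 0
  | n+1 => (if pvW g a then 1 else 0) + pvAC g (a+1) n

-- the diagonal's boolean list: m values of g starting at a
def pvGL (g : Int → Bool) (a : Int) : Nat → List Bool
  | 0 => []
  | m+1 => g a :: pvGL g (a+1) m

-- number of all-true 4-windows of a boolean list
def pvWCL : List Bool → Int
  | a :: b :: c :: d :: rest => (if a && b && c && d then 1 else 0) + pvWCL (b :: c :: d :: rest)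
  | _ => 0

-- dropping leading cells that cannot start a window
theorem pvWCL_false (l : List Bool) : pvWCL (false :: l) = pvWCL l := by
  rcases l with _ | ⟨b, _ | ⟨c, _ | ⟨d, t⟩⟩⟩ <;> simp [pvWCL]

theorem pvWCL_tf (l : List Bool) : pvWCL (true :: false :: l) = pvWCL l := by
  rcases l with _ | ⟨c, _ | ⟨d, t⟩⟩ <;> simp [pvWCL, pvWCL_false]

theorem pvWCL_ttf (l : List Bool) : pvWCL (true :: true :: false :: l) = pvWCL l := by
  rcases l with _ | ⟨d, t⟩ <;> simp [pvWCL, pvWCL_tf]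

-- a maximal run of k good cells followed by a bad cell contributes max 0 (k-3) windows
theorem pvWCL_rep_false : ∀ (k : Nat) (rest : List Bool),
    pvWCL (List.replicate k true ++ false :: rest) = max 0 ((k : Int) - 3) + pvWCL rest := by
  intro k
  induction k with
  | zero => intro rest; simp [pvWCL_false]
  | succ k ih =>
    intro rest
    rcases k with _ | _ | m
    · simp [pvWCL_tf]
    · simp [List.replicate, pvWCL_ttf]
    · rcases m with _ | j
      · -- k+1 = 3: true::true::true::false::rest
        simp only [List.replicate, List.cons_append, List.nil_append, pvWCL]
        simp [pvWCL_ttf]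
      · -- k+1 = j+4: the window at the head is all-true
        have h : List.replicate (j+4) true ++ false :: rest
            = true :: true :: true :: true :: (List.replicate j true ++ false :: rest) := by
          simp [List.replicate]
        rw [h]
        have h2 : pvWCL (true :: true :: true :: true :: (List.replicate j true ++ false :: rest))
            = 1 + pvWCL (true :: true :: true :: (List.replicate j true ++ false :: rest)) := by
          rcases hj : (List.replicate j true ++ false :: rest) with _ | ⟨x, t⟩
          · cases j <;> simp_all [List.replicate]
          · simp [pvWCL]
        rw [h2]
        have h3 : true :: true :: true :: (List.replicate j true ++ false :: rest)
            = List.replicate (j+3) true ++ false :: rest := by simp [List.replicate]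
        rw [h3, ih]
        have : (0:Int) ≤ (j:Int) := Int.natCast_nonneg j
        push_cast
        omega

-- an all-true run of k cells has max 0 (k-3) windows
theorem pvWCL_rep : ∀ (k : Nat), pvWCL (List.replicate k true) = max 0 ((k : Int) - 3) := by
  intro k
  induction k with
  | zero => simp [pvWCL]
  | succ k ih =>
    rcases k with _ | _ | _ | m
    · simp [pvWCL]
    · simp [List.replicate, pvWCL]
    · simp [List.replicate, pvWCL]
    · have h : List.replicate (m+4) true = true :: true :: true :: true :: List.replicate m true := by
        simp [List.replicate]
      have h3 : true :: true :: true :: List.replicate m true = List.replicate (m+3) true := by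
        simp [List.replicate]
      rw [show m+3+1 = m+4 from rfl, h]
      have h2 : pvWCL (true :: true :: true :: true :: List.replicate m true)
          = 1 + pvWCL (true :: true :: true :: List.replicate m true) := by
        rcases hm : List.replicate m true with _ | ⟨x, t⟩ <;> simp [pvWCL]
      rw [h2, h3, ih]
      have : (0:Int) ≤ (m:Int) := Int.natCast_nonneg m
      push_cast
      omega

-- B's run-length fold (with the final flush) counts exactly the 4-windows
theorem pvFlush : ∀ (l : List Bool) (cnt : Int) (k : Nat),
    (let st := l.foldl
        (fun (st : Int × Int) b => if b then (st.1, st.2 + 1) else (st.1 + max 0 (st.2 - 3), 0))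
        (cnt, (k : Int))
     st.1 + max 0 (st.2 - 3))
    = cnt + pvWCL (List.replicate k true ++ l) := by
  intro l
  induction l with
  | nil => intro cnt k; simp [pvWCL_rep]
  | cons b rest ih =>
    intro cnt k
    cases b
    · simp only [List.foldl, if_false, Bool.false_eq_true]
      have := ih (cnt + max 0 ((k:Int) - 3)) 0
      simp only [Nat.cast_zero, List.replicate, List.nil_append] at this
      rw [this, pvWCL_rep_false]
      ring
    · simp only [List.foldl, if_true]
      have := ih cnt (k+1)
      push_cast at this ⊢
      rw [this]
      have h : List.replicate (k+1) true ++ rest = List.replicate k true ++ true :: rest := by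
        rw [List.replicate_succ']
        simp
      rw [h]

-- the window count of the diagonal list equals A's per-window count
theorem pvWCL_gl (g : Int → Bool) : ∀ (n : Nat) (a : Int),
    pvWCL (pvGL g a (n+3)) = pvAC g a n := by
  intro n
  induction n with
  | zero => intro a; simp [pvGL, pvWCL, pvAC]
  | succ n ih =>
    intro a
    show pvWCL (g a :: g (a+1) :: g (a+1+1) :: g (a+1+1+1) :: pvGL g (a+1+1+1+1) n)
        = pvAC g a (n+1)
    have hu : pvWCL (g a :: g (a+1) :: g (a+1+1) :: g (a+1+1+1) :: pvGL g (a+1+1+1+1) n)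
        = (if g a && g (a+1) && g (a+1+1) && g (a+1+1+1) then 1 else 0)
          + pvWCL (g (a+1) :: g (a+1+1) :: g (a+1+1+1) :: pvGL g (a+1+1+1+1) n) := rfl
    rw [hu]
    have ht : g (a+1) :: g (a+1+1) :: g (a+1+1+1) :: pvGL g (a+1+1+1+1) n
        = pvGL g (a+1) (n+3) := rfl
    rw [ht, ih (a+1)]
    simp only [pvAC, pvW, show a+1+1 = a+2 from by ring, show a+2+1 = a+3 from by ring]
    rfl

-- the mapped pyRange is the diagonal list pvGL
theorem pvMap_gl (g : Int → Bool) : ∀ (m : Nat) (a : Int),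
    (PySem.List.pyRange a (a + (m : Int)) 1).map g = pvGL g a m := by
  intro m
  induction m with
  | zero =>
    intro a
    rw [show a + ((0:Nat):Int) = a from by push_cast; ring]
    simp [pvGL, PySem.List.pyRange_one_eq_nil le_rfl]
  | succ m ih =>
    intro a
    rw [PySem.List.pyRange_one_cons (by omega)]
    have harg : a + ((m+1 : Nat) : Int) = (a+1) + (m : Int) := by push_cast; ring
    rw [harg] at *
    simp [pvGL, ih (a+1)]

-- the `if x ≠ 0 then false else b` accumulator is `decide (x = 0) && b`
theorem pvIfNe (x : Int) (b : Bool) :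
    (if x ≠ 0 then false else b) = (decide (x = 0) && b) := by
  by_cases h : x = 0 <;> simp [h]

theorem pvAndComm4 (p q r s : Bool) : (s && (r && (q && p))) = (p && q && r && s) := by
  revert p q r s; decide

-- A's innermost 4-cell loop computes the window test
theorem pvInnerA (tetrag : List (List Int)) (sira i x : Int) (hx : x = i - sira) :
    (PySem.List.pyRange i (i+4) 1).foldl
      (fun (st2 : Bool × Int) d =>
        (if PySem.Int.floordiv (PySem.List.pyGetD (PySem.List.pyGetD tetrag d []) st2.2 0) 10 ≠ 0
           then false else st2.1,
         st2.2 + 1))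
      (true, x)
    = (pvW (pvG tetrag sira) i, x + 4) := by
  subst hx
  rw [PySem.List.pyRange_one_cons (by omega), PySem.List.pyRange_one_cons (by omega),
      PySem.List.pyRange_one_cons (by omega), PySem.List.pyRange_one_cons (by omega),
      PySem.List.pyRange_one_eq_nil (by omega)]
  simp only [List.foldl]
  rw [show i - sira + 1 + 1 + 1 = i+3 - sira from by ring,
      show i - sira + 1 + 1 = i+2 - sira from by ring,
      show i - sira + 1 = i+1 - sira from by ring,
      show (i+1+1+1 : Int) = i+3 from by ring,
      show (i+1+1 : Int) = i+2 from by ring]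
  simp only [Prod.mk.injEq]
  refine ⟨?_, by ring⟩
  simp only [pvW, pvG, pvIfNe, Bool.and_true]
  exact pvAndComm4 _ _ _ _

-- A's middle loop equals pvAC
theorem pvMidA (tetrag : List (List Int)) (sira : Int) : ∀ (n : Nat) (a cnt x : Int), x = a - sira →
    (PySem.List.pyRange a (a + (n : Int)) 1).foldl (fun (st : Int × Int) i =>
        let inner := (PySem.List.pyRange i (i+4) 1).foldl
          (fun (st2 : Bool × Int) d =>
            (if PySem.Int.floordiv (PySem.List.pyGetD (PySem.List.pyGetD tetrag d []) st2.2 0) 10 ≠ 0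
               then false else st2.1,
             st2.2 + 1))
          (true, st.2)
        (if inner.1 then st.1 + 1 else st.1, st.2 + 1))
      (cnt, x)
    = (cnt + pvAC (pvG tetrag sira) a n, x + n) := by
  intro n
  induction n with
  | zero => intro a cnt x hx; simp [pvAC]
  | succ n ih =>
    intro a cnt x hx
    rw [PySem.List.pyRange_one_cons (by omega)]
    simp only [List.foldl]
    rw [pvInnerA tetrag sira a x hx]
    have harg : a + ((n+1 : Nat) : Int) = (a+1) + (n : Int) := by push_cast; ring
    rw [harg, ih (a+1) _ (x+1) (by omega)]
    by_cases hw : pvW (pvG tetrag sira) a = true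
    · rw [if_pos hw,
          show pvAC (pvG tetrag sira) a (n+1) = 1 + pvAC (pvG tetrag sira) (a+1) n from by
            simp [pvAC, hw]]
      exact congrArg₂ Prod.mk (by ring) (by push_cast; ring)
    · rw [if_neg hw,
          show pvAC (pvG tetrag sira) a (n+1) = pvAC (pvG tetrag sira) (a+1) n from by
            simp [pvAC, hw]]
      exact congrArg₂ Prod.mk (by ring) (by push_cast; ring)

-- ===== VERDICT (by name: the statement is the Claim_ definition above) =====
theorem diakonia_kato_spec : Claim_equal_diakonia_kato := by
  intro tetrag diast _ _
  unfold Spec_diakonia_kato diakonia_kato diakonia_kato_alt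
  apply PySem.List.foldl_congr_mem
  intro cnt sira hmem
  rw [PySem.List.mem_pyRange_one] at hmem
  obtain ⟨h1, h2⟩ := hmem
  obtain ⟨n, ha, hb⟩ : ∃ n : Nat, diast - 3 = sira + (n : Int) ∧
      diast - 3 + 3 = sira + ((n + 3 : Nat) : Int) :=
    ⟨(diast - 3 - sira).toNat, by omega, by push_cast; omega⟩
  rw [ha, pvMidA tetrag sira n sira cnt 0 (by omega)]
  rw [show sira + (n:Int) + 3 = sira + ((n+3:Nat):Int) from by push_cast; ring]
  have hg : (fun r => decide (PySem.Int.floordiv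
      (PySem.List.pyGetD (PySem.List.pyGetD tetrag r []) (r - sira) 0) 10 = 0))
      = pvG tetrag sira := rfl
  rw [hg, pvMap_gl (pvG tetrag sira) (n+3) sira]
  have := pvFlush (pvGL (pvG tetrag sira) sira (n+3)) cnt 0
  simp only [Nat.cast_zero, List.replicate, List.nil_append] at this
  simp only
  rw [this, pvWCL_gl (pvG tetrag sira) n sira]
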